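-- pv_equiv track=rewrite | github.com/AmanPandita/Algorithms-and-Data-Structures | Hw6/test.py | maximize_profit
-- ===== SOURCE A (Python) =====
-- def maximize_profit(locations, profits, k):
--     n = len(locations)
--     sorted_locations = sorted(zip(locations, profits), key=lambda x: x[0])
--     max_profit = [0] * n
--
--     # Base case
--     max_profit[0] = sorted_locations[0][1]
--
--     # Fill DP array
--     for i in range(1, n):
--         max_profit[i] = sorted_locations[i][1]
--         j = i - 1
--         # Find the farthest location that satisfies the distance constraint
--         while j >= 0 and sorted_locations[i][0] - sorted_locations[j][0] < k:
--             j -= 1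
--         if j >= 0:
--             max_profit[i] = max(max_profit[i], max_profit[j] + sorted_locations[i][1])
--
--     # Find maximum profit
--     return max(max_profit)
-- ===== SOURCE B (Python) =====
-- def maximize_profit(locations, profits, k):
--     pairs = sorted(zip(locations, profits), key=lambda p: p[0])
--     locs = [p[0] for p in pairs]
--     dp = []
--     for i, (loc, profit) in enumerate(pairs):
--         # binary search: number of earlier pairs whose location is <= loc - k
--         target = loc - k
--         lo, hi = 0, i
--         while lo < hi:
--             mid = (lo + hi) // 2
--             if locs[mid] <= target:
--                 lo = mid + 1
--             else:
--                 hi = mid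
--         j = lo - 1  # rightmost eligible predecessor, -1 if none
--         dp.append(profit if j < 0 else max(profit, dp[j] + profit))
--     return max(dp)
-- ===== Notes on version B (the rewrite author's own statement) =====
-- stated objective: faster
-- what changed: The O(i) backward linear scan for the rightmost predecessor within distance k is replaced by a hand-written binary search over the sorted location prefix, and the fixed-size DP array written by index is replaced by an appended list.
-- outside the precondition, e.g. on maximize_profit([], [], 1): A raises IndexError, B raises ValueError; on maximize_profit([1, 2], [3], 1): A raises IndexError, B returns 3
import Mathlib
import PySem

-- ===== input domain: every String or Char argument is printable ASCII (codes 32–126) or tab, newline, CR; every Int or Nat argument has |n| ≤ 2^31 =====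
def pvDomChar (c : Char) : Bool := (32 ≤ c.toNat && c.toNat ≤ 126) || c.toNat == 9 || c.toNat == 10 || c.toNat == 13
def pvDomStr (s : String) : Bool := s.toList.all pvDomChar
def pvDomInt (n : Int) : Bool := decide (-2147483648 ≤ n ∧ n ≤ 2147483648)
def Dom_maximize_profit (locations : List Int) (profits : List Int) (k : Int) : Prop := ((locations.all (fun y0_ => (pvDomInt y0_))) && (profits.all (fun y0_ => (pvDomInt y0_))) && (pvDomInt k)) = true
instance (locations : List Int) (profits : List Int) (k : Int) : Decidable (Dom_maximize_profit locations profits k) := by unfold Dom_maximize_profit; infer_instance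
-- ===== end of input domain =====

-- B replaces A's O(i) backward scan for the rightmost in-range predecessor by a binary search
-- over the sorted location prefix (and appends to the DP list instead of writing a fixed array): asymptotically faster.


-- ===== PORT A =====
-- the inner `while j >= 0 and sorted_locations[i][0] - sorted_locations[j][0] < k: j -= 1` loop
def pvWhileJ (sl : List (Int × Int)) (xi k : Int) (j : Int) : Int :=
  if h : 0 ≤ j ∧ xi - (PySem.List.pyGetD sl j (0, 0)).1 < k then pvWhileJ sl xi k (j - 1)
  else j
termination_by (j + 1).toNat
decreasing_by omega

def maximize_profit (locations : List Int) (profits : List Int) (k : Int) : Int :=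
  let n : Int := locations.length
  let sl := PySem.List.sorted (locations.zip profits) (fun x => x.1)
  let mp0 : List Int := List.replicate locations.length 0
  let mp1 := PySem.List.pySetD mp0 0 (PySem.List.pyGetD sl 0 (0, 0)).2
  let mp := (PySem.List.pyRange 1 n).foldl (fun mp i =>
      let pi := (PySem.List.pyGetD sl i (0, 0)).2
      let mp := PySem.List.pySetD mp i pi
      let j := pvWhileJ sl (PySem.List.pyGetD sl i (0, 0)).1 k (i - 1)
      if 0 ≤ j then
        PySem.List.pySetD mp i (max (PySem.List.pyGetD mp i 0) (PySem.List.pyGetD mp j 0 + pi))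
      else mp) mp1
  (PySem.List.max? mp (fun x => x)).getD 0

-- ===== PORT B =====
-- hand-written binary search of Source B: `while lo < hi: mid = (lo+hi)//2; if locs[mid] <= target: lo = mid+1 else: hi = mid`
def pvBisect (locs : List Int) (t lo hi : Int) : Int :=
  if h : lo < hi then
    let mid := PySem.Int.floordiv (lo + hi) 2
    if PySem.List.pyGetD locs mid 0 ≤ t then pvBisect locs t (mid + 1) hi
    else pvBisect locs t lo mid
  else lo
termination_by (hi - lo).toNat
decreasing_by
  · have hb := PySem.Int.floordiv_two_mid_bounds (le_of_lt h)
    omega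
  · have hb := PySem.Int.floordiv_two_mid_bounds (le_of_lt h)
    have : PySem.Int.floordiv (lo + hi) 2 < hi := by
      rw [PySem.Int.floordiv_lt_iff_lt_mul (by omega)]; omega
    omega

def maximize_profit_alt (locations : List Int) (profits : List Int) (k : Int) : Int :=
  let pairs := PySem.List.sorted (locations.zip profits) (fun p => p.1)
  let locs := pairs.map (fun p => p.1)
  let dp := (PySem.List.enumerate pairs).foldl (fun dp ip =>
      let j := pvBisect locs (ip.2.1 - k) 0 ip.1 - 1
      dp ++ [if j < 0 then ip.2.2 else max ip.2.2 (PySem.List.pyGetD dp j 0 + ip.2.2)]) []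
  (PySem.List.max? dp (fun x => x)).getD 0

-- ===== PRECONDITION & SPEC =====
-- A raises IndexError when locations is empty (max_profit[0]) or when profits is shorter than
-- locations (zip truncates, sorted_locations[i] for i ≥ len(profits)); exactly those are excluded.
def Pre_maximize_profit (locations : List Int) (profits : List Int) (k : Int) : Prop :=
  locations ≠ [] ∧ locations.length ≤ profits.length
instance (locations : List Int) (profits : List Int) (k : Int) : Decidable (Pre_maximize_profit locations profits k) := by unfold Pre_maximize_profit; infer_instance
def pvWitness_maximize_profit : List Int × List Int × Int := ([1, 3], [2, 4], 2)

def Spec_maximize_profit (locations : List Int) (profits : List Int) (k : Int) (out : Int) : Prop := out = maximize_profit_alt locations profits k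
instance (locations : List Int) (profits : List Int) (k : Int) (out : Int) : Decidable (Spec_maximize_profit locations profits k out) := by unfold Spec_maximize_profit; infer_instance

-- ===== CLAIM (what is proved, stated in full; the proofs are below) =====
def Claim_equal_maximize_profit : Prop := ∀ (locations : List Int) (profits : List Int) (k : Int), Dom_maximize_profit locations profits k → Pre_maximize_profit locations profits k → Spec_maximize_profit locations profits k (maximize_profit locations profits k)

-- ===== LEMMAS AND PROOFS =====

-- index helpers phrased with List.getD to avoid dependent index proofs
lemma pvGetD_int (xs : List Int) (i : Int) (d : Int) (h0 : 0 ≤ i) :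
    PySem.List.pyGetD xs i d = xs.getD i.toNat d := by
  have : i = ((i.toNat : Nat) : Int) := by omega
  rw [this, PySem.List.pyGetD_natCast]
  congr 2

lemma pvGetD_pair_int (xs : List (Int × Int)) (i : Int) (d : Int × Int) (h0 : 0 ≤ i) :
    PySem.List.pyGetD xs i d = xs.getD i.toNat d := by
  have : i = ((i.toNat : Nat) : Int) := by omega
  rw [this, PySem.List.pyGetD_natCast]
  congr 2

-- binary-search invariant for Source B's hand-written loop
lemma pvBisect_inv (locs : List Int) (t : Int)
    (hmono : ∀ p q : Nat, p ≤ q → q < locs.length → locs.getD p 0 ≤ locs.getD q 0) :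
    ∀ lo hi : Int, 0 ≤ lo → lo ≤ hi → hi ≤ (locs.length : Int) →
    (∀ m : Nat, (m : Int) < lo → m < locs.length → locs.getD m 0 ≤ t) →
    lo ≤ pvBisect locs t lo hi ∧ pvBisect locs t lo hi ≤ hi ∧
      (∀ m : Nat, (m : Int) < pvBisect locs t lo hi → m < locs.length → locs.getD m 0 ≤ t) ∧
      (∀ m : Nat, pvBisect locs t lo hi ≤ (m : Int) → (m : Int) < hi → m < locs.length → t < locs.getD m 0) := by
  intro lo hi
  induction lo, hi using pvBisect.induct (locs := locs) (t := t) with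
  | case1 lo hi h mid hle ih =>
    intro h0 hlh hh hbelow
    have hmideq : mid = PySem.Int.floordiv (lo + hi) 2 := rfl
    clear_value mid
    subst hmideq
    have hmid := PySem.Int.floordiv_two_mid_bounds (le_of_lt h)
    have hmidlt : PySem.Int.floordiv (lo + hi) 2 < hi := by
      rw [PySem.Int.floordiv_lt_iff_lt_mul (by omega)]; omega
    rw [pvBisect, dif_pos h, if_pos hle]
    set mid := PySem.Int.floordiv (lo + hi) 2 with hmiddef
    have hmget : PySem.List.pyGetD locs mid 0 = locs.getD mid.toNat 0 := pvGetD_int _ _ _ (by omega)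
    have ihr := ih (by omega) (by omega) (by omega) (by
      intro m hm hmlen
      by_cases hcase : (m : Int) < lo
      · exact hbelow m hcase hmlen
      · have h1 : m ≤ mid.toNat := by omega
        have h2 : mid.toNat < locs.length := by omega
        calc locs.getD m 0 ≤ locs.getD mid.toNat 0 := hmono m mid.toNat h1 h2
          _ ≤ t := by rw [← hmget]; exact hle)
    refine ⟨by omega, ihr.2.1, ihr.2.2.1, ihr.2.2.2⟩
  | case2 lo hi h mid hle ih =>
    intro h0 hlh hh hbelow
    have hmideq : mid = PySem.Int.floordiv (lo + hi) 2 := rfl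
    clear_value mid
    subst hmideq
    have hmid := PySem.Int.floordiv_two_mid_bounds (le_of_lt h)
    have hmidlt : PySem.Int.floordiv (lo + hi) 2 < hi := by
      rw [PySem.Int.floordiv_lt_iff_lt_mul (by omega)]; omega
    rw [pvBisect, dif_pos h, if_neg hle]
    set mid := PySem.Int.floordiv (lo + hi) 2 with hmiddef
    have hmget : PySem.List.pyGetD locs mid 0 = locs.getD mid.toNat 0 := pvGetD_int _ _ _ (by omega)
    have ihr := ih (by omega) (by omega) (by omega) hbelow
    refine ⟨ihr.1, by omega, ihr.2.2.1, ?_⟩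
    intro m hr hm hmlen
    by_cases hcase : (m : Int) < mid
    · exact ihr.2.2.2 m hr hcase hmlen
    · have h1 : mid.toNat ≤ m := by omega
      have h2 : t < locs.getD mid.toNat 0 := by rw [← hmget]; omega
      exact lt_of_lt_of_le h2 (hmono mid.toNat m h1 hmlen)
  | case3 lo hi h =>
    intro h0 hlh hh hbelow
    rw [pvBisect, dif_neg h]
    exact ⟨le_refl _, hlh, fun m hm hl => hbelow m hm hl, fun m h1 h2 _ => absurd (by omega : lo < hi) h⟩

-- the backward scan of A returns c - 1 when c is the number of eligible prefix elements
lemma pvWhileJ_eq (sl : List (Int × Int)) (xi k : Int) (c : Int) (hc0 : 0 ≤ c)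
    (hstop : 0 < c → ¬ (xi - (PySem.List.pyGetD sl (c - 1) (0, 0)).1 < k)) :
    ∀ j : Int, c - 1 ≤ j →
    (∀ m : Int, c ≤ m → m ≤ j → xi - (PySem.List.pyGetD sl m (0, 0)).1 < k) →
    pvWhileJ sl xi k j = c - 1 := by
  intro j
  induction j using pvWhileJ.induct (sl := sl) (xi := xi) (k := k) with
  | case1 j h ih =>
    intro hcj hgo
    have hjc : c ≤ j := by
      by_contra hn
      have hj : j = c - 1 := by omega
      exact hstop (by omega) (by rw [← hj]; exact h.2)
    rw [pvWhileJ, dif_pos h]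
    exact ih (by omega) (fun m hm1 hm2 => hgo m hm1 (by omega))
  | case2 j h =>
    intro hcj hgo
    rw [pvWhileJ, dif_neg h]
    by_contra hne
    have hjc : c ≤ j := by omega
    exact h ⟨by omega, hgo j hjc le_rfl⟩

-- the loop bodies of the two ports, as named step functions (proof-side only)
def pvStepA (sl : List (Int × Int)) (k : Int) (mp : List Int) (i : Int) : List Int :=
  let pi := (PySem.List.pyGetD sl i (0, 0)).2
  let mp := PySem.List.pySetD mp i pi
  let j := pvWhileJ sl (PySem.List.pyGetD sl i (0, 0)).1 k (i - 1)
  if 0 ≤ j then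
    PySem.List.pySetD mp i (max (PySem.List.pyGetD mp i 0) (PySem.List.pyGetD mp j 0 + pi))
  else mp

def pvStepB (locs : List Int) (k : Int) (dp : List Int) (ip : Int × (Int × Int)) : List Int :=
  let j := pvBisect locs (ip.2.1 - k) 0 ip.1 - 1
  dp ++ [if j < 0 then ip.2.2 else max ip.2.2 (PySem.List.pyGetD dp j 0 + ip.2.2)]

lemma pvSetLen (xs : List Int) (y v : Int) (ys : List Int) :
    (xs ++ y :: ys).set xs.length v = xs ++ v :: ys := by
  induction xs with
  | nil => simp
  | cons a as ih => simp [ih]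

lemma pvGetDLen (xs : List Int) (y d : Int) (ys : List Int) :
    (xs ++ y :: ys).getD xs.length d = y := by
  induction xs with
  | nil => simp
  | cons a as ih => simpa using ih

lemma pvSetLen' (xs : List Int) (m : Nat) (y v : Int) (ys : List Int) (h : xs.length = m) :
    (xs ++ y :: ys).set m v = xs ++ v :: ys := by
  subst h; exact pvSetLen xs y v ys

lemma pvGetDLen' (xs : List Int) (m : Nat) (y d : Int) (ys : List Int) (h : xs.length = m) :
    (xs ++ y :: ys).getD m d = y := by
  subst h; exact pvGetDLen xs y d ys

lemma pvLocsGetD (sl : List (Int × Int)) (i : Nat) (h : i < sl.length) :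
    (sl.map (fun p => p.1)).getD i 0 = (sl.getD i (0, 0)).1 := by
  rw [List.getD_eq_getElem _ _ (by simpa using h), List.getD_eq_getElem _ _ h, List.getElem_map]

-- A's backward scan agrees with B's binary search on the sorted prefix
lemma pvBridge (sl : List (Int × Int)) (k : Int) (m : Nat) (hm : m < sl.length)
    (hmono : ∀ p q : Nat, p ≤ q → q < sl.length → (sl.getD p (0, 0)).1 ≤ (sl.getD q (0, 0)).1) :
    pvWhileJ sl (sl.getD m (0, 0)).1 k ((m : Int) - 1)
      = pvBisect (sl.map (fun p => p.1)) ((sl.getD m (0, 0)).1 - k) 0 (m : Int) - 1 := by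
  set locs := sl.map (fun p => p.1) with hlocs
  have hlen : locs.length = sl.length := by simp [hlocs]
  have hmono' : ∀ p q : Nat, p ≤ q → q < locs.length → locs.getD p 0 ≤ locs.getD q 0 := by
    intro p q hpq hq
    rw [pvLocsGetD _ _ (by omega), pvLocsGetD _ _ (by omega)]
    exact hmono p q hpq (by omega)
  obtain ⟨h1, h2, hbel, habv⟩ := pvBisect_inv locs ((sl.getD m (0, 0)).1 - k) hmono'
    0 (m : Int) (le_refl 0) (by omega) (by omega)
    (fun m' hm' _ => absurd hm' (by omega))
  set c := pvBisect locs ((sl.getD m (0, 0)).1 - k) 0 (m : Int) with hc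
  refine pvWhileJ_eq sl _ k c h1 ?_ ((m : Int) - 1) (by omega) ?_
  · intro hc0
    rw [pvGetD_pair_int _ _ _ (by omega)]
    have hb := hbel (c - 1).toNat (by omega) (by omega)
    rw [pvLocsGetD _ _ (by omega)] at hb
    omega
  · intro mi hm1 hm2
    rw [pvGetD_pair_int _ _ _ (by omega)]
    have ha := habv mi.toNat (by omega) (by omega) (by omega)
    rw [pvLocsGetD _ _ (by omega)] at ha
    omega

-- both loops build the same DP values: A's array is B's list padded with the untouched zeros
lemma pvMain (sl : List (Int × Int)) (k : Int)
    (hmono : ∀ p q : Nat, p ≤ q → q < sl.length → (sl.getD p (0, 0)).1 ≤ (sl.getD q (0, 0)).1) :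
    ∀ m : Nat, 1 ≤ m → m ≤ sl.length →
      ((PySem.List.enumerate (sl.take m)).foldl (pvStepB (sl.map (fun p => p.1)) k) []).length = m ∧
      (PySem.List.pyRange 1 (m : Int)).foldl (pvStepA sl k)
          (PySem.List.pySetD (List.replicate sl.length 0) 0 (PySem.List.pyGetD sl 0 (0, 0)).2)
        = ((PySem.List.enumerate (sl.take m)).foldl (pvStepB (sl.map (fun p => p.1)) k) [])
            ++ List.replicate (sl.length - m) 0 := by
  intro m
  induction m with
  | zero => intro h1 _; exact absurd h1 (by omega)
  | succ m ih =>
    intro _ hle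
    by_cases hm0 : m = 0
    · subst hm0
      cases sl with
      | nil => simp at hle
      | cons hd tl =>
        constructor
        · simp [PySem.List.enumerate_cons, PySem.List.enumerate_nil, pvStepB, pvBisect]
        · rw [show ((0 + 1 : Nat) : Int) = 1 by norm_num, PySem.List.pyRange_one_eq_nil le_rfl]
          simp [PySem.List.enumerate_cons, PySem.List.enumerate_nil, pvStepB, pvBisect,
            List.replicate_succ]
          rw [show (0 : Int) = ((0 : Nat) : Int) by norm_num, PySem.List.pySetD_natCast]
          simp
    · have h1m : 1 ≤ m := by omega
      have hmlt : m < sl.length := by omega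
      obtain ⟨ihlen, iheq⟩ := ih h1m (by omega)
      have htake : sl.take (m + 1) = sl.take m ++ [sl.getD m (0, 0)] := by
        rw [List.take_succ]
        simp [List.getElem?_eq_getElem hmlt, List.getD_eq_getElem _ _ hmlt]
      have hlentake : (sl.take m).length = m := by
        simp [List.length_take]; omega
      rw [htake, PySem.List.enumerate_append, List.foldl_append, hlentake]
      rw [show PySem.List.enumerate [sl.getD m (0, 0)] (0 + (m : Int))
            = [((m : Int), sl.getD m (0, 0))] by
          simp [PySem.List.enumerate_cons, PySem.List.enumerate_nil]]
      rw [show ((m + 1 : Nat) : Int) = (m : Int) + 1 by push_cast; ring]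
      rw [PySem.List.pyRange_one_succ_right (by omega), List.foldl_append, iheq]
      have hmono' : ∀ p q : Nat, p ≤ q → q < (sl.map (fun p => p.1)).length →
          (sl.map (fun p => p.1)).getD p 0 ≤ (sl.map (fun p => p.1)).getD q 0 := by
        intro p q hpq hq
        rw [pvLocsGetD _ _ (by simpa using lt_of_le_of_lt hpq hq), pvLocsGetD _ _ (by simpa using hq)]
        exact hmono p q hpq (by simpa using hq)
      obtain ⟨hc1, hc2, -, -⟩ := pvBisect_inv (sl.map (fun p => p.1)) ((sl.getD m (0, 0)).1 - k)
        hmono' 0 (m : Int) (le_refl 0) (by omega) (by simp; omega)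
        (fun m' hm' _ => absurd hm' (by omega))
      simp only [List.foldl_cons, List.foldl_nil, pvStepA, pvStepB,
        PySem.List.pyGetD_natCast, PySem.List.pySetD_natCast]
      rw [pvBridge sl k m hmlt hmono]
      set x := sl.getD m (0, 0) with hx
      set j := pvBisect (sl.map (fun p => p.1)) (x.1 - k) 0 (m : Int) - 1 with hj
      set dBm := List.foldl (pvStepB (List.map (fun p => p.1) sl) k) []
        (PySem.List.enumerate (List.take m sl)) with hdBm
      have hrepl : List.replicate (sl.length - m) (0 : Int)
          = 0 :: List.replicate (sl.length - (m + 1)) 0 := by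
        rw [← List.replicate_succ]; congr 1; omega
      rw [hrepl, pvSetLen' _ m _ _ _ ihlen]
      constructor
      · simp [ihlen]
      · by_cases hjs : 0 ≤ j
        · rw [if_pos hjs, if_neg (by omega)]
          rw [pvGetDLen' _ m _ _ _ ihlen]
          rw [pvGetD_int (dBm ++ x.2 :: List.replicate (sl.length - (m + 1)) 0) j 0 hjs,
            pvGetD_int dBm j 0 hjs]
          rw [List.getD_append _ _ _ _ (by rw [ihlen]; omega)]
          rw [pvSetLen' _ m _ _ _ ihlen]
          simp
        · rw [if_neg hjs, if_pos (by omega)]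
          simp

-- ===== VERDICT (by name: the statement is the Claim_ definition above) =====
theorem maximize_profit_spec : Claim_equal_maximize_profit := by
  unfold Claim_equal_maximize_profit
  intro locations profits k _ hpre
  obtain ⟨hne, hlenp⟩ := hpre
  unfold Spec_maximize_profit
  set sl := PySem.List.sorted (locations.zip profits) (fun x => x.1) with hsl
  have hslen : sl.length = locations.length := by
    rw [hsl, PySem.List.length_sorted, List.length_zip]; omega
  have hn1 : 1 ≤ sl.length := by
    have : locations.length ≠ 0 := fun h => hne (List.length_eq_zero_iff.mp h)
    omega
  have hmono : ∀ p q : Nat, p ≤ q → q < sl.length → (sl.getD p (0, 0)).1 ≤ (sl.getD q (0, 0)).1 := by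
    intro p q hpq hq
    have h := PySem.List.key_sorted_getElem_mono (locations.zip profits) (fun x => x.1) hpq hq
    rw [List.getD_eq_getElem _ _ (lt_of_le_of_lt hpq hq), List.getD_eq_getElem _ _ hq]
    exact h
  obtain ⟨-, hmain⟩ := pvMain sl k hmono sl.length hn1 le_rfl
  rw [List.take_length] at hmain
  show (PySem.List.max? ((PySem.List.pyRange 1 (locations.length : Int)).foldl (pvStepA sl k)
      (PySem.List.pySetD (List.replicate locations.length 0) 0 (PySem.List.pyGetD sl 0 (0, 0)).2))
      (fun x => x)).getD 0
    = (PySem.List.max? ((PySem.List.enumerate sl).foldl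
        (pvStepB (sl.map (fun p => p.1)) k) []) (fun x => x)).getD 0
  rw [← hslen, hmain]
  simp
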